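-- pv_equiv track=rewrite | github.com/AmberJing88/algorithm-datastructure | string/StringReview.py | movesteps
-- ===== SOURCE A (Python) =====
-- def movesteps(s,k):
--     def reversestring(s):
--         n = len(s)
--         res = ''
--         for i in range(n):
--             res += s[n-1-i]
--         return res
--
--     sub1 = reversestring(s[:k+1])
--     sub2 = reversestring(s[k+1:])
--     return reversestring(sub1+sub2)
-- ===== SOURCE B (Python) =====
-- def movesteps(s, k):
--     return s[k+1:] + s[:k+1]
-- ===== Notes on version B (the rewrite author's own statement) =====
-- stated objective: simpler
-- what changed: Replaces the triple character-by-character reversal (reverse prefix, reverse suffix, reverse the concatenation) with the rotation computed directly as s[k+1:] + s[:k+1] by slicing, dropping the reversestring helper and all loops.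
import Mathlib
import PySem

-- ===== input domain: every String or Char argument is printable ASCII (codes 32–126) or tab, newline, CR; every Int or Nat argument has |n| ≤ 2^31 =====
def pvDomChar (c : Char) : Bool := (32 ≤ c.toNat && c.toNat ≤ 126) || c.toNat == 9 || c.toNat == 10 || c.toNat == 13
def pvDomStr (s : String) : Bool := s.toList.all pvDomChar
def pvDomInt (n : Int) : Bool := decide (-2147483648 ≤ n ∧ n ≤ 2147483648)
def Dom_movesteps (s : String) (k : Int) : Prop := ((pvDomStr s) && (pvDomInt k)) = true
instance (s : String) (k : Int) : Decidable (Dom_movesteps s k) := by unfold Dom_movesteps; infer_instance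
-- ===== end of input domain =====

-- B replaces A's triple hand-written reversal with the direct slice rotation s[k+1:] + s[:k+1] (simpler; return value only).

-- ===== PORT A =====
-- reversestring: res = ''; for i in range(n): res += s[n-1-i]
def pvRevStr (l : List Char) : List Char :=
  (List.range l.length).foldl (fun res i => res ++ (l[l.length - 1 - i]?).toList) []

def movesteps (s : String) (k : Int) : String :=
  let l := s.toList
  let sub1 := pvRevStr (PySem.List.slice l none (some (k + 1)))
  let sub2 := pvRevStr (PySem.List.slice l (some (k + 1)) none)
  String.ofList (pvRevStr (sub1 ++ sub2))

-- ===== PORT B =====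
def movesteps_alt (s : String) (k : Int) : String :=
  let l := s.toList
  String.ofList (PySem.List.slice l (some (k + 1)) none ++ PySem.List.slice l none (some (k + 1)))

-- ===== PRECONDITION & SPEC =====
def Spec_movesteps (s : String) (k : Int) (out : String) : Prop := out = movesteps_alt s k
instance (s : String) (k : Int) (out : String) : Decidable (Spec_movesteps s k out) := by unfold Spec_movesteps; infer_instance

-- ===== CLAIM (what is proved, stated in full; the proofs are below) =====
def Claim_equal_movesteps : Prop := ∀ (s : String) (k : Int), Dom_movesteps s k → Spec_movesteps s k (movesteps s k)

-- ===== LEMMAS AND PROOFS =====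

theorem pvRevStr_aux (l : List Char) (m : Nat) (hm : m ≤ l.length) :
    (List.range m).foldl (fun res i => res ++ (l[l.length - 1 - i]?).toList) []
      = (l.drop (l.length - m)).reverse := by
  induction m with
  | zero => simp
  | succ m ih =>
    have hlt : l.length - 1 - m < l.length := by omega
    rw [List.range_succ, List.foldl_append, ih (by omega)]
    have hdrop : l.drop (l.length - (m + 1)) = l[l.length - 1 - m] :: l.drop (l.length - m) := by
      have : l.length - (m + 1) = l.length - 1 - m := by omega
      rw [this, List.drop_eq_getElem_cons hlt]
      have h2 : l.length - 1 - m + 1 = l.length - m := by omega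
      rw [h2]
    simp [hdrop, List.getElem?_eq_getElem hlt]

theorem pvRevStr_eq_reverse (l : List Char) : pvRevStr l = l.reverse := by
  have := pvRevStr_aux l l.length le_rfl
  simpa [pvRevStr] using this

-- ===== VERDICT (by name: the statement is the Claim_ definition above) =====
theorem movesteps_spec : Claim_equal_movesteps := by
  intro s k _
  unfold Spec_movesteps movesteps movesteps_alt
  simp [pvRevStr_eq_reverse, List.reverse_append]
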